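-- pv_equiv track=rewrite | github.com/Parac3lsus/AnyoneAi-Sprint1-NBA | main.py | name_cleaner
-- ===== SOURCE A (Python) =====
-- def name_cleaner(name):
--   spaces = 0
--   n = 0
--   output_name =""
--   for c in name:
--     if c == " ":
--       spaces += 1
--     if spaces > 1:
--       output_name = name[:n]
--       return output_name
--     n += 1
--   return name
-- ===== SOURCE B (Python) =====
-- def name_cleaner(name):
--     tokens = name.split(" ")
--     return " ".join(tokens[:2])
-- ===== Notes on version B (the rewrite author's own statement) =====
-- stated objective: idiomatic
-- what changed: Replaced the character-by-character scan with a manual space counter and slice-on-early-return by tokenize-then-slice: split the name on the space separator and rejoin the first two tokens.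
import Mathlib
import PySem

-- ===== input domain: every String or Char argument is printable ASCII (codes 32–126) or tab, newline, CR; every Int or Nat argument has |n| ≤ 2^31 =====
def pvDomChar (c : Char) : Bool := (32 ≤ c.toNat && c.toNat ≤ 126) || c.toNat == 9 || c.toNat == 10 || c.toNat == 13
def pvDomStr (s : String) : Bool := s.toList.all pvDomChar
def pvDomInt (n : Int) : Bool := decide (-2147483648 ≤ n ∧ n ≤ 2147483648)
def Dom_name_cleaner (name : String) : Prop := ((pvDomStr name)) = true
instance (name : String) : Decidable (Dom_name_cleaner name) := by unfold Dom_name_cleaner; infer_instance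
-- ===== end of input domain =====

-- B replaces A's manual space-counting scan with the idiomatic split-on-space / rejoin-first-two-tokens one-liner (same cost).

-- ===== PORT A =====
-- A's for-loop over the characters, carrying the space counter and index; name[:n] = take n.
def nameCleanerGo (full : List Char) (rest : List Char) (spaces : Nat) (n : Nat) : List Char :=
  match rest with
  | [] => full
  | c :: cs =>
      let spaces' := if c == ' ' then spaces + 1 else spaces
      if 1 < spaces' then full.take n
      else nameCleanerGo full cs spaces' (n + 1)

def name_cleaner (name : String) : String :=
  String.ofList (nameCleanerGo name.toList name.toList 0 0)

-- ===== PORT B =====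
-- tokens = name.split(" "); return " ".join(tokens[:2])
def name_cleaner_alt (name : String) : String :=
  String.ofList (PySem.Chars.join [' ']
    (PySem.List.slice (PySem.Chars.splitOn name.toList [' ']) none (some 2)))

-- ===== PRECONDITION & SPEC =====
def Spec_name_cleaner (name : String) (out : String) : Prop := out = name_cleaner_alt name
instance (name : String) (out : String) : Decidable (Spec_name_cleaner name out) := by unfold Spec_name_cleaner; infer_instance

-- ===== CLAIM (what is proved, stated in full; the proofs are below) =====
def Claim_equal_name_cleaner : Prop := ∀ (name : String), Dom_name_cleaner name → Spec_name_cleaner name (name_cleaner name)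

-- ===== LEMMAS AND PROOFS =====

-- Reference function: characters up to (excluding) the second space; `seen` = a space has already passed.
def refTrunc (seen : Bool) : List Char → List Char
  | [] => []
  | c :: r => if c = ' ' then (if seen then [] else c :: refTrunc true r) else c :: refTrunc seen r

-- Structural version of splitting on a single space (empty pieces kept, Python semantics).
def split1 : List Char → List (List Char)
  | [] => [[]]
  | c :: r => if c = ' ' then [] :: split1 r else (c :: (split1 r).headI) :: (split1 r).tail

lemma split1_ne_nil (l : List Char) : split1 l ≠ [] := by
  cases l
  · simp [split1]
  · simp only [split1]; split <;> simp

lemma split1_head_tail (l : List Char) : split1 l = (split1 l).headI :: (split1 l).tail := by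
  cases hs : split1 l with
  | nil => exact absurd hs (split1_ne_nil l)
  | cons h t => simp

lemma headI_split1 (l : List Char) : (split1 l).headI = refTrunc true l := by
  induction l with
  | nil => simp [split1, refTrunc]
  | cons c r ih => by_cases hc : c = ' ' <;> simp [split1, refTrunc, hc, ih]

lemma go_space (fuel : Nat) : ∀ (l cur : List Char) (acc : List (List Char)),
    l.length < fuel →
    PySem.Chars.splitOn.go [' '] fuel l cur acc =
      acc.reverse ++ (cur.reverse ++ (split1 l).headI) :: (split1 l).tail := by
  induction fuel with
  | zero => intro l cur acc h; omega
  | succ f ih =>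
      intro l cur acc h
      cases l with
      | nil => simp [PySem.Chars.splitOn.go, split1]
      | cons c rest =>
          by_cases hc : c = ' '
          · rw [PySem.Chars.splitOn.go]
            simp only [hc, List.isPrefixOf, BEq.rfl, Bool.true_and,
              if_pos, List.length_nil, List.length_cons, List.drop_succ_cons, List.drop_zero]
            rw [ih rest [] (cur.reverse :: acc) (by simpa using Nat.lt_of_succ_lt_succ h)]
            rw [split1_head_tail rest]
            simp only [split1, if_pos, List.headI_cons, List.tail_cons, List.reverse_cons,
              List.append_assoc, List.nil_append, List.cons_append, List.append_nil,
              List.reverse_nil]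
            rw [← split1_head_tail rest]
          · rw [PySem.Chars.splitOn.go]
            have hpre : [' '].isPrefixOf (c :: rest) = false := by
              simp [List.isPrefixOf]; exact fun h' => hc h'.symm
            simp only [hpre, Bool.false_eq_true, if_neg, not_false_iff]
            rw [ih rest (c :: cur) acc (by simpa using Nat.lt_of_succ_lt_succ h)]
            simp [split1, hc]
lemma splitOn_space (l : List Char) : PySem.Chars.splitOn l [' '] = split1 l := by
  unfold PySem.Chars.splitOn
  rw [go_space (l.length + 1) l [] [] (by omega)]
  simpa using (split1_head_tail l).symm

lemma join_cons_char (sep : List Char) (c : Char) (h : List Char) (t : List (List Char)) :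
    PySem.Chars.join sep ((c :: h) :: t) = c :: PySem.Chars.join sep (h :: t) := by
  cases t with
  | nil => simp [PySem.Chars.join, List.intercalate]
  | cons y t' => rw [PySem.Chars.join_cons_cons, PySem.Chars.join_cons_cons]; simp

lemma joinB (l : List Char) :
    PySem.Chars.join [' '] (List.take 2 (split1 l)) = refTrunc false l := by
  induction l with
  | nil => simp [split1, refTrunc, PySem.Chars.join, List.intercalate]
  | cons c r ih =>
      by_cases hc : c = ' '
      · rw [show split1 (c :: r) = [] :: split1 r by simp [split1, hc]]
        rw [split1_head_tail r]
        rw [show List.take 2 ([] :: (split1 r).headI :: (split1 r).tail)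
              = [[], (split1 r).headI] by simp]
        rw [PySem.Chars.join_cons_cons, PySem.Chars.join_singleton]
        simp [refTrunc, hc, headI_split1]
      · rw [show split1 (c :: r) = (c :: (split1 r).headI) :: (split1 r).tail by
              simp [split1, hc]]
        rw [split1_head_tail r] at ih
        rw [show List.take 2 ((c :: (split1 r).headI) :: (split1 r).tail)
              = (c :: (split1 r).headI) :: List.take 1 (split1 r).tail by simp]
        rw [join_cons_char]
        rw [show (split1 r).headI :: List.take 1 (split1 r).tail
              = List.take 2 ((split1 r).headI :: (split1 r).tail) by simp]
        rw [ih]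
        simp [refTrunc, hc]

lemma goA_eq (rest : List Char) : ∀ (full : List Char) (n : Nat) (seen : Bool),
    rest = List.drop n full →
    nameCleanerGo full rest (if seen then 1 else 0) n = full.take n ++ refTrunc seen rest := by
  induction rest with
  | nil =>
      intro full n seen h
      have : full.length ≤ n := List.drop_eq_nil_iff.mp h.symm
      simp [nameCleanerGo, refTrunc, List.take_of_length_le this]
  | cons c cs ih =>
      intro full n seen h
      have hget : full[n]? = some c := by
        rw [← List.head?_drop, ← h]; rfl
      have hcs : cs = List.drop (n + 1) full := by
        rw [← List.tail_drop, ← h]; rfl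
      have htake : full.take (n + 1) = full.take n ++ [c] := by
        rw [List.take_add_one, hget]; rfl
      by_cases hc : c = ' '
      · cases seen with
        | false =>
            have h1 : nameCleanerGo full cs 1 (n + 1)
                = full.take (n + 1) ++ refTrunc true cs := ih full (n + 1) true hcs
            show nameCleanerGo full (c :: cs) 0 n = full.take n ++ refTrunc false (c :: cs)
            rw [show nameCleanerGo full (c :: cs) 0 n = nameCleanerGo full cs 1 (n + 1) by
              simp [nameCleanerGo, hc]]
            rw [h1, htake]
            simp [refTrunc, hc]
        | true =>
            show nameCleanerGo full (c :: cs) 1 n = full.take n ++ refTrunc true (c :: cs)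
            simp [nameCleanerGo, refTrunc, hc]
      · cases seen with
        | false =>
            have h1 : nameCleanerGo full cs 0 (n + 1)
                = full.take (n + 1) ++ refTrunc false cs := ih full (n + 1) false hcs
            show nameCleanerGo full (c :: cs) 0 n = full.take n ++ refTrunc false (c :: cs)
            rw [show nameCleanerGo full (c :: cs) 0 n = nameCleanerGo full cs 0 (n + 1) by
              simp [nameCleanerGo, hc]]
            rw [h1, htake]
            simp [refTrunc, hc]
        | true =>
            have h1 : nameCleanerGo full cs 1 (n + 1)
                = full.take (n + 1) ++ refTrunc true cs := ih full (n + 1) true hcs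
            show nameCleanerGo full (c :: cs) 1 n = full.take n ++ refTrunc true (c :: cs)
            rw [show nameCleanerGo full (c :: cs) 1 n = nameCleanerGo full cs 1 (n + 1) by
              simp [nameCleanerGo, hc]]
            rw [h1, htake]
            simp [refTrunc, hc]

lemma slice_take2 (xs : List (List Char)) :
    PySem.List.slice xs none (some 2) = List.take 2 xs := by
  simp [PySem.List.slice]

-- ===== VERDICT (by name: the statement is the Claim_ definition above) =====
theorem name_cleaner_spec : Claim_equal_name_cleaner := by
  intro name _
  unfold Spec_name_cleaner name_cleaner name_cleaner_alt
  have h0 : nameCleanerGo name.toList name.toList 0 0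
      = List.take 0 name.toList ++ refTrunc false name.toList :=
    goA_eq name.toList name.toList 0 false (by simp)
  rw [h0, splitOn_space, slice_take2, joinB]
  simp
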